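-- pv_equiv track=rewrite | github.com/yingl/LintCodeInPython | moving-target.py | MoveTarget
-- ===== SOURCE A (Python) =====
-- def MoveTarget(nums, target):
--     # write your code here
--     steps = 0
--     for i in range(len(nums) - 1, -1, -1):
--         if nums[i] == target:
--             steps += 1
--         else:
--             nums[i + steps] = nums[i]
--     for i in range(steps):
--         nums[i] = target
--     return nums
-- ===== SOURCE B (Python) =====
-- def MoveTarget(nums, target):
--     c = nums.count(target)
--     rest = [x for x in nums if x != target]
--     nums[:] = [target] * c + rest
--     return nums
-- ===== Notes on version B (the rewrite author's own statement) =====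
-- stated objective: simpler
-- what changed: Replaces A's in-place right-to-left compaction with a running offset (and a second fill loop) by count-and-rebuild: count the targets, filter out the rest, and slice-assign [target]*c + rest back into the list.
import Mathlib
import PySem

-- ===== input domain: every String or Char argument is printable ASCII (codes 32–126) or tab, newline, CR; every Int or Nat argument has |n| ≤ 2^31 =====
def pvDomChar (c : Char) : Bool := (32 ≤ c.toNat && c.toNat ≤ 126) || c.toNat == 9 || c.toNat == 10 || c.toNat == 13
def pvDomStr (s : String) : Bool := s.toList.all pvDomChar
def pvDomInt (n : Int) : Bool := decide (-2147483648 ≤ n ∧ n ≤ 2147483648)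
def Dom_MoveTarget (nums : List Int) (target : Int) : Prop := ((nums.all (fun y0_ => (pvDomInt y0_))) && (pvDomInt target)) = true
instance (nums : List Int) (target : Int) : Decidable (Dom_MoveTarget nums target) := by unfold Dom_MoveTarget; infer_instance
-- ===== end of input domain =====

-- B replaces A's in-place right-to-left compaction (running offset + fill loop) by
-- count-and-rebuild: [target]*count ++ the non-target elements in order (simpler).
-- Both Pythons mutate `nums` in place and return the same object; the equivalence
-- proved here is about the returned value (the final list contents, which coincide
-- with the mutated contents in both).

-- ===== PORT A =====
-- one iteration of A's first loop: if nums[i] == target bump steps else nums[i+steps] = nums[i]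
-- (`steps` is a nonnegative Python int, kept as Nat; every write index i+steps is in range,
--  so List.set is exact for Python's in-range item assignment)
def MoveTargetStep (target : Int) (st : List Int × Nat) (i : Int) : List Int × Nat :=
  if PySem.List.pyGetD st.1 i 0 = target then (st.1, st.2 + 1)
  else (st.1.set (i.toNat + st.2) (PySem.List.pyGetD st.1 i 0), st.2)

def MoveTarget (nums : List Int) (target : Int) : List Int :=
  let st := (PySem.List.pyRange ((nums.length : Int) - 1) (-1) (-1)).foldl
              (MoveTargetStep target) (nums, 0)
  (PySem.List.pyRange 0 (st.2 : Int) 1).foldl (fun l i => l.set i.toNat target) st.1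

-- ===== PORT B =====
def MoveTarget_alt (nums : List Int) (target : Int) : List Int :=
  List.replicate (nums.count target) target ++ nums.filter (· != target)

-- ===== PRECONDITION & SPEC =====
def Spec_MoveTarget (nums : List Int) (target : Int) (out : List Int) : Prop := out = MoveTarget_alt nums target
instance (nums : List Int) (target : Int) (out : List Int) : Decidable (Spec_MoveTarget nums target out) := by unfold Spec_MoveTarget; infer_instance

-- ===== CLAIM (what is proved, stated in full; the proofs are below) =====
def Claim_equal_MoveTarget : Prop := ∀ (nums : List Int) (target : Int), Dom_MoveTarget nums target → Spec_MoveTarget nums target (MoveTarget nums target)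

-- ===== LEMMAS AND PROOFS =====

-- peel the last element off a countdown range
lemma pyRange_neg_one_snoc (a k : Int) (h : k ≤ a) :
    PySem.List.pyRange a (k - 1) (-1) = PySem.List.pyRange a k (-1) ++ [k] := by
  have h1 : k - 1 + 1 = k := by ring
  rw [PySem.List.pyRange_neg_one_eq_reverse a (k - 1), h1,
      PySem.List.pyRange_one_cons (by omega : k < a + 1),
      List.reverse_cons, ← PySem.List.pyRange_neg_one_eq_reverse a k]

-- invariant of A's first loop: after processing the last m indices, the suffix has been
-- compacted to the non-target elements, the running offset equals their target-count,
-- and the prefix (up to the write frontier) is still the original list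
lemma loop1_inv (nums : List Int) (target : Int) :
    ∀ m : Nat, m ≤ nums.length →
    (PySem.List.pyRange ((nums.length : Int) - 1) ((nums.length : Int) - m - 1) (-1)).foldl
        (MoveTargetStep target) (nums, 0)
      = (nums.take (nums.length - m + (nums.drop (nums.length - m)).count target)
           ++ (nums.drop (nums.length - m)).filter (· != target),
         (nums.drop (nums.length - m)).count target) := by
  intro m
  induction m with
  | zero =>
    intro _
    simp only [Nat.cast_zero, sub_zero]
    rw [PySem.List.pyRange_neg_one_eq_nil (le_refl _)]
    simp
  | succ m ih =>
    intro hm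
    have hmn : m < nums.length := by omega
    set n := nums.length with hn
    set k := n - (m + 1) with hk
    have hk1 : n - m = k + 1 := by omega
    have hkc : ((n : Int) - (m + 1) - 1) = ((k : Int) - 1) := by
      have : (k : Int) = (n : Int) - (m + 1) := by omega
      omega
    have hkc2 : ((n : Int) - m - 1) = (k : Int) := by omega
    push_cast
    rw [hkc, pyRange_neg_one_snoc _ _ (by omega : (k : Int) ≤ (n : Int) - 1),
        List.foldl_append]
    have ihh := ih (by omega)
    rw [hkc2] at ihh
    rw [ihh, hk1]
    -- notation for the state after m iterations
    have hkn : k < n := by omega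
    have hdropk : nums.drop k = nums[k] :: nums.drop (k + 1) := by
      exact List.drop_eq_getElem_cons hkn
    set c := (nums.drop (k + 1)).count target with hc
    set F := (nums.drop (k + 1)).filter (· != target) with hF
    have hclen : c ≤ n - (k + 1) := by
      have := List.count_le_length (l := nums.drop (k + 1)) (a := target)
      simpa [hn] using this
    have hkcn : k + c < n := by omega
    have hlen_take : (nums.take (k + 1 + c)).length = k + 1 + c := by
      simp
      omega
    -- reading the current list at index k gives the original nums[k]
    have hread : PySem.List.pyGetD (nums.take (k + 1 + c) ++ F) (k : Int) 0 = nums[k] := by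
      have hklt : (k : Int) < ((nums.take (k + 1 + c) ++ F).length : Int) := by
        have : k < (nums.take (k + 1 + c)).length := by omega
        have := List.length_append (as := nums.take (k + 1 + c)) (bs := F)
        omega
      rw [PySem.List.pyGetD_eq_getElem _ _ (Int.natCast_nonneg k) hklt]
      have hkl : (k : Int).toNat = k := by omega
      simp only [hkl]
      rw [List.getElem_append_left (by omega)]
      exact List.getElem_take
    by_cases ht : nums[k] = target
    · -- target: steps += 1, list unchanged
      simp only [List.foldl_cons, List.foldl_nil, MoveTargetStep, hread, ht, if_true]
      have hcount : (nums.drop k).count target = c + 1 := by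
        rw [hdropk, List.count_cons]
        simp [ht, hc]
      have hfilt : (nums.drop k).filter (· != target) = F := by
        rw [hdropk, List.filter_cons]
        simp [ht, hF]
      rw [hcount, hfilt]
      have : k + (c + 1) = k + 1 + c := by omega
      rw [this]
    · -- non-target: write nums[k] at index k + steps
      simp only [List.foldl_cons, List.foldl_nil, MoveTargetStep, hread, if_neg ht]
      have hcount : (nums.drop k).count target = c := by
        rw [hdropk, List.count_cons]
        simp [ht, hc]
      have hfilt : (nums.drop k).filter (· != target) = nums[k] :: F := by
        rw [hdropk, List.filter_cons]
        simp [ht, hF]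
      rw [hcount, hfilt]
      have hkl : ((k : Int)).toNat = k := by omega
      simp only [hkl]
      -- split the prefix at the write position
      have hsplit : nums.take (k + 1 + c) = nums.take (k + c) ++ [nums[k + c]] := by
        have : k + 1 + c = (k + c) + 1 := by omega
        rw [this, List.take_add_one]
        simp [List.getElem?_eq_getElem hkcn]
      rw [hsplit, List.append_assoc, List.singleton_append]
      have hlen2 : (nums.take (k + c)).length = k + c := by simp; omega
      rw [List.set_append_right _ _ (by omega)]
      simp [hlen2]

-- A's second loop overwrites the first `a.length` cells with `target`
lemma loop2_fill (t : Int) : ∀ (a b : List Int),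
    (List.range a.length).foldl (fun l (i : Nat) => l.set i t) (a ++ b)
      = List.replicate a.length t ++ b := by
  intro a
  induction a using List.reverseRecOn with
  | nil => intro b; simp
  | append_singleton a x ih =>
    intro b
    rw [List.length_append, List.length_singleton, List.range_succ, List.foldl_append,
        List.append_assoc, List.singleton_append, ih (x :: b)]
    simp only [List.foldl_cons, List.foldl_nil]
    rw [List.set_append_right _ _ (by simp), List.replicate_succ']
    simp

-- ===== VERDICT (by name: the statement is the Claim_ definition above) =====
theorem MoveTarget_spec : Claim_equal_MoveTarget := by
  intro nums target _
  unfold Spec_MoveTarget MoveTarget MoveTarget_alt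
  have h := loop1_inv nums target nums.length (le_refl _)
  have h0 : ((nums.length : Int) - (nums.length : Nat) - 1) = (-1 : Int) := by omega
  rw [h0] at h
  simp only [Nat.sub_self, List.drop_zero] at h
  rw [h]
  set c := nums.count target with hc
  have hclen : c ≤ nums.length := List.count_le_length
  show List.foldl (fun l i => l.set i.toNat target)
      (List.take (0 + c) nums ++ List.filter (fun x => x != target) nums)
      (PySem.List.pyRange 0 (c : Int) 1)
    = List.replicate c target ++ List.filter (fun x => x != target) nums
  rw [PySem.List.pyRange_zero_natCast, List.foldl_map]
  simp only [Int.toNat_natCast]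
  have hlen : (nums.take c).length = c := by simp; omega
  have := loop2_fill target (nums.take c) (nums.filter (· != target))
  rw [hlen] at this
  simpa using this
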